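-- pv_equiv track=rewrite | github.com/helgaminch/wwcode_mit_spring2017 | ps3.py | are_all_letters_valid
-- ===== SOURCE A (Python) =====
-- def are_all_letters_valid(word, hand):
--     """
--     Returns True if all letters of the word are in hand and False otherwise
--     word: string
--     hand: dictionary(string -> int)
--     returns: boolean
--     """
--     hand_copy = hand.copy()
--     for letter in word.lower():
--         if hand_copy.get(letter, 0) == 0:
--             return False
--         else:
--             hand_copy[letter] -= 1
--     return True
-- ===== SOURCE B (Python) =====
-- def are_all_letters_valid(word, hand):
--     need = {}
--     for ch in word.lower():
--         need[ch] = need.get(ch, 0) + 1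
--     return all(hand.get(ch, 0) >= n for ch, n in need.items())
-- ===== Notes on version B (the rewrite author's own statement) =====
-- stated objective: simpler
-- what changed: B counts the word's letter demand once into a frequency dict and then compares aggregate demand against the hand's supply in a separate pass, instead of A's copy-the-hand-and-decrement scan with early return.
-- intended difference: On inputs where some lowercased letter of the word has a negative count in hand while every needed letter is otherwise sufficiently supplied, A returns True (its ==0 test treats a negative supply as inexhaustible) while B returns False, the intended value since a negative count cannot supply any letter. — e.g. on are_all_letters_valid("a", [("a", -1)]): A returns true, B returns false
import Mathlib
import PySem

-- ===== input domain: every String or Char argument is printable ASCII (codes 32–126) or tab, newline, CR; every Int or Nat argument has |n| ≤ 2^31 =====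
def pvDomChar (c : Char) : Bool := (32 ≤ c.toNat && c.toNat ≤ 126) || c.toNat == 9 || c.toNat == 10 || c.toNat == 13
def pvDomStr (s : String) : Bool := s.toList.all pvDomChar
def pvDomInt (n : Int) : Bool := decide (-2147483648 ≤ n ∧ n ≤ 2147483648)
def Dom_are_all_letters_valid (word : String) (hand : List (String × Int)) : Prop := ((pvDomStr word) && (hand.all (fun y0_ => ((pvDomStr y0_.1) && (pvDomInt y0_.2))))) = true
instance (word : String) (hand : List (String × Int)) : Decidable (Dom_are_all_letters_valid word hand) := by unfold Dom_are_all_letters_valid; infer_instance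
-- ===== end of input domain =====

-- B replaces A's copy-and-decrement scan by counting the word's demand once and comparing it against the hand's supply
-- (objective: simpler); on hands giving a needed letter a negative count B's verdict intentionally differs (see D_ below).

-- the letters Python's `for letter in word.lower()` iterates over, each a 1-character string (shared representation helper)
def pvLetters (word : String) : List String :=
  ((PySem.Str.lower word).toList).map (fun c => String.ofList [c])

-- ===== PORT A =====
def pvGoA (ls : List String) (h : PySem.Dict String Int) : Bool :=
  match ls with
  | [] => true
  | s :: rest =>
    if h.getD s 0 == 0 then false
    else pvGoA rest (h.insert s (h.getD s 0 - 1))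

def are_all_letters_valid (word : String) (hand : List (String × Int)) : Bool :=
  pvGoA (pvLetters word) (PySem.Dict.mk hand)

-- ===== PORT B =====
def are_all_letters_valid_alt (word : String) (hand : List (String × Int)) : Bool :=
  let need : PySem.Dict String Int :=
    (pvLetters word).foldl (fun d s => d.insert s (d.getD s 0 + 1)) PySem.Dict.empty
  need.items.all (fun p => decide ((PySem.Dict.mk hand).getD p.1 0 ≥ p.2))

-- ===== PRECONDITION & SPEC =====
-- On inputs where at least one lowercased letter of the word has a negative count in hand while every needed letter is
-- otherwise sufficiently supplied, A returns True (its `== 0` test treats a negative supply as inexhaustible) while B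
-- returns False, the intended value since a negative count cannot supply any letter.
def D_are_all_letters_valid (word : String) (hand : List (String × Int)) : Prop :=
  (∃ s ∈ pvLetters word, (PySem.Dict.mk hand).getD s 0 < 0) ∧
  (∀ s ∈ pvLetters word,
    (PySem.Dict.mk hand).getD s 0 < 0 ∨ ((pvLetters word).count s : Int) ≤ (PySem.Dict.mk hand).getD s 0)
instance (word : String) (hand : List (String × Int)) : Decidable (D_are_all_letters_valid word hand) := by
  unfold D_are_all_letters_valid; infer_instance

def Spec_are_all_letters_valid (word : String) (hand : List (String × Int)) (out : Bool) : Prop :=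
  ¬ D_are_all_letters_valid word hand → out = are_all_letters_valid_alt word hand
instance (word : String) (hand : List (String × Int)) (out : Bool) : Decidable (Spec_are_all_letters_valid word hand out) := by
  unfold Spec_are_all_letters_valid; infer_instance

def pvDiffWitness_are_all_letters_valid : String × (List (String × Int)) := ("a", [("a", -1)])
def pvDiffWitnessOut_are_all_letters_valid : Bool × Bool := (true, false)

-- ===== CLAIM (what is proved, stated in full; the proofs are below) =====
def Claim_unchanged_are_all_letters_valid : Prop := ∀ (word : String) (hand : List (String × Int)), Dom_are_all_letters_valid word hand → Spec_are_all_letters_valid word hand (are_all_letters_valid word hand)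
def Claim_changed_are_all_letters_valid : Prop := Dom_are_all_letters_valid (pvDiffWitness_are_all_letters_valid.1) (pvDiffWitness_are_all_letters_valid.2) ∧ D_are_all_letters_valid (pvDiffWitness_are_all_letters_valid.1) (pvDiffWitness_are_all_letters_valid.2) ∧ are_all_letters_valid (pvDiffWitness_are_all_letters_valid.1) (pvDiffWitness_are_all_letters_valid.2) = pvDiffWitnessOut_are_all_letters_valid.1 ∧ are_all_letters_valid_alt (pvDiffWitness_are_all_letters_valid.1) (pvDiffWitness_are_all_letters_valid.2) = pvDiffWitnessOut_are_all_letters_valid.2 ∧ pvDiffWitnessOut_are_all_letters_valid.1 ≠ pvDiffWitnessOut_are_all_letters_valid.2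
def Claim_exact_are_all_letters_valid : Prop := ∀ (word : String) (hand : List (String × Int)), Dom_are_all_letters_valid word hand → D_are_all_letters_valid word hand → are_all_letters_valid word hand ≠ are_all_letters_valid_alt word hand

-- ===== LEMMAS AND PROOFS =====

-- A's decrementing scan succeeds iff each needed letter has negative supply (never exhausted) or supply ≥ demand
theorem pvGoA_eq (ls : List String) (h : PySem.Dict String Int) :
    pvGoA ls h = decide (∀ s ∈ ls, h.getD s 0 < 0 ∨ (ls.count s : Int) ≤ h.getD s 0) := by
  induction ls generalizing h with
  | nil => simp [pvGoA]
  | cons s rest ih =>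
    by_cases hv : h.getD s 0 = 0
    · have hnot : ¬ (∀ t ∈ s :: rest, h.getD t 0 < 0 ∨ ((s :: rest).count t : Int) ≤ h.getD t 0) := by
        intro hall
        have := hall s (List.mem_cons_self ..)
        have hc : 1 ≤ (s :: rest).count s := List.count_pos_iff.mpr (List.mem_cons_self ..)
        rcases this with h1 | h2 <;> omega
      rw [decide_eq_false hnot]
      simp [pvGoA, hv]
    · simp only [pvGoA]
      rw [if_neg (by simpa using hv), ih]
      apply decide_eq_decide.mpr
      have hins : ∀ u, (h.insert s (h.getD s 0 - 1)).getD u 0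
          = if u = s then h.getD s 0 - 1 else h.getD u 0 := by
        intro u
        by_cases hus : u = s
        · subst hus; simp
        · simp [PySem.Dict.getD_insert, hus]
      have hcnt : ∀ u, ((s :: rest).count u : Int)
          = (rest.count u : Int) + (if u = s then 1 else 0) := by
        intro u
        by_cases hus : u = s
        · subst hus; simp
        · simp [hus, Ne.symm hus]
      constructor
      · intro hall u hu
        rw [hcnt u]
        by_cases hus : u = s
        · rw [if_pos hus, hus]
          by_cases hmem : s ∈ rest
          · have h1 := hall s hmem
            rw [hins s, if_pos rfl] at h1
            omega
          · have h0 : rest.count s = 0 := List.count_eq_zero.mpr hmem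
            rw [h0]
            omega
        · rw [if_neg hus]
          have h1 := hall u (by
            rcases List.mem_cons.mp hu with h' | h'
            · exact absurd h' hus
            · exact h')
          rw [hins u, if_neg hus] at h1
          omega
      · intro hall u hu
        rw [hins u]
        have h1 := hall u (List.mem_cons_of_mem s hu)
        rw [hcnt u] at h1
        by_cases hus : u = s
        · rw [if_pos hus] at h1 ⊢
          rw [hus] at h1 ⊢
          omega
        · rw [if_neg hus] at h1 ⊢
          omega

theorem portA_eq (word : String) (hand : List (String × Int)) :
    are_all_letters_valid word hand =
      decide (∀ s ∈ pvLetters word,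
        (PySem.Dict.mk hand).getD s 0 < 0 ∨
        ((pvLetters word).count s : Int) ≤ (PySem.Dict.mk hand).getD s 0) := by
  unfold are_all_letters_valid
  exact pvGoA_eq _ _

theorem portB_eq (word : String) (hand : List (String × Int)) :
    are_all_letters_valid_alt word hand =
      decide (∀ s ∈ pvLetters word,
        ((pvLetters word).count s : Int) ≤ (PySem.Dict.mk hand).getD s 0) := by
  unfold are_all_letters_valid_alt
  rw [PySem.Dict.foldl_insert_getD_add_one_eq_counter]
  simp only [PySem.Dict.items_counter]
  rw [Bool.eq_iff_iff]
  simp [List.all_eq_true, PySem.Set.mem_ofList]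

theorem are_all_letters_valid_spec : Claim_unchanged_are_all_letters_valid := by
  intro word hand _ hD
  rw [portA_eq, portB_eq]
  apply decide_eq_decide.mpr
  constructor
  · intro hA t ht
    by_contra hlt
    push Not at hlt
    have hneg : (PySem.Dict.mk hand).getD t 0 < 0 := by
      rcases hA t ht with h1 | h2
      · exact h1
      · omega
    exact hD ⟨⟨t, ht, hneg⟩, hA⟩
  · intro hB t ht
    exact Or.inr (hB t ht)

theorem are_all_letters_valid_changed : Claim_changed_are_all_letters_valid := by
  unfold Claim_changed_are_all_letters_valid; decide

theorem are_all_letters_valid_tight : Claim_exact_are_all_letters_valid := by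
  intro word hand _ hD
  rcases hD with ⟨⟨t, ht, hneg⟩, hall⟩
  rw [portA_eq, portB_eq]
  have hA : (∀ s ∈ pvLetters word,
      (PySem.Dict.mk hand).getD s 0 < 0 ∨
      ((pvLetters word).count s : Int) ≤ (PySem.Dict.mk hand).getD s 0) := hall
  have hB : ¬ (∀ s ∈ pvLetters word,
      ((pvLetters word).count s : Int) ≤ (PySem.Dict.mk hand).getD s 0) := by
    intro hb
    have hc : 1 ≤ (pvLetters word).count t := List.count_pos_iff.mpr ht
    have := hb t ht
    omega
  rw [decide_eq_true hA, decide_eq_false hB]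
  simp
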